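-- pv_equiv track=rewrite | github.com/Squadrick/shadesmar | simul/simul.py | process_includes
-- ===== SOURCE A (Python) =====
-- def process_includes(source_code):
--   shm_inc = []
--   other_inc = []
--   good_source_code = []
--   for line in source_code:
--     if "#include" in line:
--       mod = line[len("#include"):].strip()[1:-1]
--       if "shadesmar" in mod:
--         shm_inc.append(mod)
--         continue
--       else:
--         other_inc.append(mod)
--     good_source_code.append(line)
--
--   return shm_inc, other_inc, good_source_code
-- ===== SOURCE B (Python) =====
-- def process_includes(source_code):
--     n = len(source_code)
--     if n == 0:
--         return [], [], []
--     if n == 1: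
--         line = source_code[0]
--         if "#include" in line:
--             mod = line[len("#include"):].strip()[1:-1]
--             if "shadesmar" in mod:
--                 return [mod], [], []
--             return [], [mod], [line]
--         return [], [], [line]
--     mid = n // 2
--     ls, lo, lg = process_includes(source_code[:mid])
--     rs, ro, rg = process_includes(source_code[mid:])
--     return ls + rs, lo + ro, lg + rg
-- ===== Notes on version B (the rewrite author's own statement) =====
-- stated objective: alternative
-- what changed: A's single fused three-accumulator loop is replaced by a divide-and-conquer recursion: the line list is split in half, each half is processed recursively (base case classifies one line), and the three result lists are concatenated; correctness rests on the classification being pointwise, so concatenation of sub-results equals the sequential scan.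
import Mathlib
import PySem

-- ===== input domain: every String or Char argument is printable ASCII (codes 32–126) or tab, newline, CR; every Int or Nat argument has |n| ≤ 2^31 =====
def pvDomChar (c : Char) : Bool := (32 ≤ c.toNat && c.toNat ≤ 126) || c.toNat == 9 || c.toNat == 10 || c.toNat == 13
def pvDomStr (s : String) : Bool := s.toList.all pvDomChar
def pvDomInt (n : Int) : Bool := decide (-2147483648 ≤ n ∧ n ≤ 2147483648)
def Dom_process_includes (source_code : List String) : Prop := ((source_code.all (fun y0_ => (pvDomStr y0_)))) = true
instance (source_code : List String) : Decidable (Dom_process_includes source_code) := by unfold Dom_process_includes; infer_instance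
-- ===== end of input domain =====

-- B replaces A's single fused three-accumulator loop by a divide-and-conquer recursion
-- (split in half, recurse, concatenate the three result lists); objective: alternative.

-- ===== PORT A =====
-- literal transliteration of A's single loop: one fold carrying the three accumulators
def process_includes (source_code : List String) : List String × List String × List String :=
  source_code.foldl
    (fun acc line =>
      let shm := acc.1
      let other := acc.2.1
      let good := acc.2.2
      if PySem.Str.isIn "#include" line then
        let mod := PySem.Str.slice (PySem.Str.strip (PySem.Str.slice line (some 8) none)) (some 1) (some (-1))
        if PySem.Str.isIn "shadesmar" mod then
          (shm ++ [mod], other, good)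
        else
          (shm, other ++ [mod], good ++ [line])
      else
        (shm, other, good ++ [line]))
    ([], [], [])

-- ===== PORT B =====
-- B-side helper: mod = line[len("#include"):].strip()[1:-1]
def pvModOf (line : String) : String :=
  PySem.Str.slice (PySem.Str.strip (PySem.Str.slice line (some 8) none)) (some 1) (some (-1))

-- divide and conquer, as in Source B: sc[:mid] / sc[mid:] with mid = n // 2 ≥ 0 are
-- take mid / drop mid (exact: PySem.List.slice_to_natCast / slice_from_natCast)
def process_includes_alt (source_code : List String) : List String × List String × List String :=
  if source_code.length = 0 then ([], [], [])
  else if source_code.length = 1 then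
    let line := source_code.headD ""   -- source_code[0]; exact since length = 1
    if PySem.Str.isIn "#include" line then
      let mod := pvModOf line
      if PySem.Str.isIn "shadesmar" mod then ([mod], [], [])
      else ([], [mod], [line])
    else ([], [], [line])
  else
    let mid := source_code.length / 2
    let l := process_includes_alt (source_code.take mid)
    let r := process_includes_alt (source_code.drop mid)
    (l.1 ++ r.1, l.2.1 ++ r.2.1, l.2.2 ++ r.2.2)
termination_by source_code.length
decreasing_by
  · simp only [List.length_take]; omega
  · simp only [List.length_drop]; omega

-- ===== PRECONDITION & SPEC =====
def Spec_process_includes (source_code : List String) (out : List String × List String × List String) : Prop := out = process_includes_alt source_code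
instance (source_code : List String) (out : List String × List String × List String) : Decidable (Spec_process_includes source_code out) := by unfold Spec_process_includes; infer_instance

-- ===== CLAIM (what is proved, stated in full; the proofs are below) =====
def Claim_equal_process_includes : Prop := ∀ (source_code : List String), Dom_process_includes source_code → Spec_process_includes source_code (process_includes source_code)

-- ===== LEMMAS AND PROOFS =====

-- the common characterisation: each output list is a filtered/mapped image of the input
def pvTriple (sc : List String) : List String × List String × List String :=
  ((sc.filter (fun line =>
      PySem.Str.isIn "#include" line && PySem.Str.isIn "shadesmar" (pvModOf line))).map pvModOf,
   (sc.filter (fun line =>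
      PySem.Str.isIn "#include" line && !PySem.Str.isIn "shadesmar" (pvModOf line))).map pvModOf,
   sc.filter (fun line =>
      !(PySem.Str.isIn "#include" line && PySem.Str.isIn "shadesmar" (pvModOf line))))

theorem pvTriple_append (xs ys : List String) :
    pvTriple (xs ++ ys) =
      ((pvTriple xs).1 ++ (pvTriple ys).1,
       (pvTriple xs).2.1 ++ (pvTriple ys).2.1,
       (pvTriple xs).2.2 ++ (pvTriple ys).2.2) := by
  simp [pvTriple]

-- loop invariant for A: the fold appends exactly the three filtered/mapped suffixes
theorem process_includes_go (sc s o g : List String) :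
    sc.foldl
      (fun acc line =>
        let shm := acc.1
        let other := acc.2.1
        let good := acc.2.2
        if PySem.Str.isIn "#include" line then
          let mod := PySem.Str.slice (PySem.Str.strip (PySem.Str.slice line (some 8) none)) (some 1) (some (-1))
          if PySem.Str.isIn "shadesmar" mod then
            (shm ++ [mod], other, good)
          else
            (shm, other ++ [mod], good ++ [line])
        else
          (shm, other, good ++ [line]))
      (s, o, g)
    = (s ++ (pvTriple sc).1, o ++ (pvTriple sc).2.1, g ++ (pvTriple sc).2.2) := by
  induction sc generalizing s o g with
  | nil => simp [pvTriple]
  | cons l t ih =>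
    simp only [List.foldl_cons, pvTriple, List.filter_cons]
    by_cases h1 : PySem.Str.isIn "#include" l = true
    · by_cases h2 : PySem.Str.isIn "shadesmar" (PySem.Str.slice (PySem.Str.strip (PySem.Str.slice l (some 8) none)) (some 1) (some (-1))) = true
      · simp only [pvModOf, h1, h2, Bool.and_self, Bool.not_true,
          Bool.and_false, Bool.false_eq_true, if_true, if_false]
        rw [ih]; simp [pvTriple, pvModOf]
      · simp only [Bool.not_eq_true] at h2
        simp only [pvModOf, h1, h2, Bool.true_and, Bool.and_false, Bool.not_false,
          Bool.false_eq_true, if_true, if_false]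
        rw [ih]; simp [pvTriple, pvModOf]
    · simp only [Bool.not_eq_true] at h1
      simp only [pvModOf, h1, Bool.false_and, Bool.not_false, Bool.false_eq_true,
        if_true, if_false]
      rw [ih]; simp [pvTriple, pvModOf]

-- B computes the same characterisation, by strong induction on the length
theorem process_includes_alt_eq (sc : List String) :
    process_includes_alt sc = pvTriple sc := by
  induction hn : sc.length using Nat.strong_induction_on generalizing sc with
  | _ n ih =>
    rw [process_includes_alt]
    by_cases h0 : sc.length = 0
    · have : sc = [] := List.length_eq_zero_iff.mp h0
      simp [this, h0, pvTriple]
    · by_cases h1 : sc.length = 1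
      · obtain ⟨l, hl⟩ := List.length_eq_one_iff.mp h1
        subst hl
        simp only [h0, h1, if_false, if_true, List.headD_cons]
        by_cases hi : PySem.Chars.isIn ['#','i','n','c','l','u','d','e'] l.toList = true
        · by_cases hs : PySem.Chars.isIn ['s','h','a','d','e','s','m','a','r'] (pvModOf l).toList = true
          · simp [pvTriple, PySem.Str.isIn, hi, hs]
          · simp only [Bool.not_eq_true] at hs
            simp [pvTriple, PySem.Str.isIn, hi, hs]
        · simp only [Bool.not_eq_true] at hi
          simp [pvTriple, PySem.Str.isIn, hi]
      · simp only [h0, h1, if_false]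
        have hmidlt : sc.length / 2 < sc.length := by omega
        have hrecl : (sc.take (sc.length / 2)).length < n := by
          simp only [List.length_take]; omega
        have hrecr : (sc.drop (sc.length / 2)).length < n := by
          simp only [List.length_drop]; omega
        rw [ih _ hrecl _ rfl, ih _ hrecr _ rfl]
        have := pvTriple_append (sc.take (sc.length / 2)) (sc.drop (sc.length / 2))
        rw [List.take_append_drop] at this
        rw [this]

-- ===== VERDICT (by name: the statement is the Claim_ definition above) =====
theorem process_includes_spec : Claim_equal_process_includes := by
  intro sc _
  show _ = _
  rw [process_includes, process_includes_go, process_includes_alt_eq]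
  simp
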